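-- pv_equiv track=rewrite | github.com/JSeHoone/TIL | Programmers/133499.py | solution
-- ===== SOURCE A (Python) =====
-- def solution(babbling):
--     answer = 0
--     speak_word = ['aya', 'ye','woo','ma']
--
--     count = 0
--     for word in babbling:
--         pre_speak_word = '' # 연속 된 단어를 방지 하기 위함
--         target_word = "" # 현재 말하는 단어를 저장
--
--         for alpha in word:
--             target_word += alpha
--
--             if target_word in speak_word: # target_word가 speak_word에 있는지?
--                 if pre_speak_word == target_word: # 이전에 말한 단어랑 같은지 ?
--                     break # count 할 수 없음 !
--
--                 else: # 다르다면 target_word를 초기화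
--                     pre_speak_word = target_word
--                     target_word = ''
--
--         if target_word == '':
--             answer += 1
--
--
--     return answer
-- ===== SOURCE B (Python) =====
-- def solution(babbling):
--     WORDS = ('aya', 'ye', 'woo', 'ma')
--
--     def speakable(s, prev):
--         if not s:
--             return True
--         for w in WORDS:
--             if w != prev and s.startswith(w):
--                 return speakable(s[len(w):], w)
--         return False
--
--     return sum(speakable(s, '') for s in babbling)
-- ===== Notes on version B (the rewrite author's own statement) =====
-- stated objective: alternative
-- what changed: Replaces A's char-by-char accumulator with pre/target loop state by a recursive greedy tokenizer that strips one whole valid word (different from the previous one) off the front at each step and accepts when the string is consumed.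
import Mathlib
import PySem

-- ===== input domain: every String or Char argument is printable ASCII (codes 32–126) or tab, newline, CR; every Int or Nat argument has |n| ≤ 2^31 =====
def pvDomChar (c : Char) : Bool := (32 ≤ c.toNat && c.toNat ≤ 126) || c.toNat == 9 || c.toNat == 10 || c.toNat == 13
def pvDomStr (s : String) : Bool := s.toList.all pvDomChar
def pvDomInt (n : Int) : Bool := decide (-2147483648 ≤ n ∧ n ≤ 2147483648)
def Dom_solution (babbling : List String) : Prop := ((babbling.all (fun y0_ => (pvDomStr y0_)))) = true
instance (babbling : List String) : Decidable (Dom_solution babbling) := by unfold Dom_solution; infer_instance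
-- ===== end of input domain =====

-- B is an alternative implementation of the same cost: a recursive greedy tokenizer stripping whole
-- words off the front, instead of A's char-by-char accumulator with pre/target loop state.

-- ===== PORT A =====
-- Python strings are ported as their character lists (exact: Python str concatenation, equality and
-- iteration correspond to List Char append, equality and structural recursion).
def pvWordsA : List (List Char) := [['a','y','a'], ['y','e'], ['w','o','o'], ['m','a']]

-- A's inner `for alpha in word` loop; returns the final target_word (the break returns the current
-- target_word, exactly as the Python break leaves it)
def pvInnerA : List Char → List Char → List Char → List Char
  | [], _pre, target => target
  | c :: rest, pre, target =>
    let t := target ++ [c]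
    if t ∈ pvWordsA then
      if pre = t then t
      else pvInnerA rest t []
    else pvInnerA rest pre t

def solution (babbling : List String) : Int :=
  babbling.foldl (fun answer word =>
    if pvInnerA word.toList [] [] = [] then answer + 1 else answer) 0

-- ===== PORT B =====
-- Source B's `speakable(s, prev)`: try the four words in order; strip the first one that is a prefix of
-- s and differs from prev, recurse on the remainder (s[len(w):] = drop); the for-loop over the
-- 4-tuple of words is transcribed as the if-else chain in the same order.
def pvSpeakB : List Char → List Char → Bool
  | [], _prev => true
  | c :: rest, prev =>
    if (decide (['a','y','a'] ≠ prev)) && (['a','y','a'].isPrefixOf (c :: rest)) then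
      pvSpeakB ((c :: rest).drop 3) ['a','y','a']
    else if (decide (['y','e'] ≠ prev)) && (['y','e'].isPrefixOf (c :: rest)) then
      pvSpeakB ((c :: rest).drop 2) ['y','e']
    else if (decide (['w','o','o'] ≠ prev)) && (['w','o','o'].isPrefixOf (c :: rest)) then
      pvSpeakB ((c :: rest).drop 3) ['w','o','o']
    else if (decide (['m','a'] ≠ prev)) && (['m','a'].isPrefixOf (c :: rest)) then
      pvSpeakB ((c :: rest).drop 2) ['m','a']
    else false
  termination_by l _ => l.length
  decreasing_by all_goals (simp [List.length_drop]; try omega)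

def solution_alt (babbling : List String) : Int :=
  babbling.foldl (fun acc s => acc + (if pvSpeakB s.toList [] then 1 else 0)) 0

-- ===== PRECONDITION & SPEC =====
def Spec_solution (babbling : List String) (out : Int) : Prop := out = solution_alt babbling
instance (babbling : List String) (out : Int) : Decidable (Spec_solution babbling out) := by unfold Spec_solution; infer_instance

-- ===== CLAIM (what is proved, stated in full; the proofs are below) =====
def Claim_equal_solution : Prop := ∀ (babbling : List String), Dom_solution babbling → Spec_solution babbling (solution babbling)

-- ===== LEMMAS AND PROOFS =====

-- If the accumulated target is nonempty and is not a prefix of any valid word, A's inner loop can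
-- never reset it to [] again.
theorem pvDead : ∀ (l : List Char) (pre t : List Char), t ≠ [] →
    (∀ w ∈ pvWordsA, ¬ t <+: w) → pvInnerA l pre t ≠ [] := by
  intro l
  induction l with
  | nil => intro pre t ht _; simpa [pvInnerA] using ht
  | cons c rest ih =>
    intro pre t ht hw
    have htc : t <+: t ++ [c] := List.prefix_append t [c]
    have hmem : t ++ [c] ∉ pvWordsA := fun h => hw _ h htc
    simp only [pvInnerA, hmem, if_neg, not_false_eq_true]
    exact ih pre (t ++ [c]) (by simp) (fun w hwm hp => hw w hwm (htc.trans hp))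

-- main equivalence of the per-string loops: A's inner loop ends with target_word = '' iff B's
-- tokenizer accepts the string
theorem pvMain : ∀ (n : ℕ) (l : List Char), l.length ≤ n → ∀ prev,
    (pvInnerA l prev [] = []) ↔ (pvSpeakB l prev = true) := by
  intro n
  induction n with
  | zero =>
    intro l hl prev
    have h0 : l = [] := List.eq_nil_of_length_eq_zero (Nat.le_zero.mp hl)
    subst h0; simp [pvInnerA, pvSpeakB]
  | succ n ih =>
    intro l hl prev
    match l with
    | [] => simp [pvInnerA, pvSpeakB]
    | c :: rest =>
      by_cases hca : c = 'a'
      · subst hca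
        match rest with
        | [] =>
          simp [pvInnerA, pvSpeakB, pvWordsA, List.isPrefixOf]
        | d :: r2 =>
          by_cases hd : d = 'y'
          · subst hd
            match r2 with
            | [] =>
              simp [pvInnerA, pvSpeakB, pvWordsA, List.isPrefixOf]
            | e :: r3 =>
              by_cases he : e = 'a'
              · subst he
                by_cases hp : prev = ['a','y','a']
                · subst hp
                  simp [pvInnerA, pvSpeakB, pvWordsA, List.isPrefixOf]
                · have hr : r3.length ≤ n := by
                    simp at hl; omega
                  simp only [pvInnerA, pvSpeakB, pvWordsA, List.isPrefixOf]
                  simp [hp, Ne.symm hp, ih r3 hr]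
              · constructor
                · intro h
                  exfalso
                  have hdead : pvInnerA r3 prev ['a','y',e] ≠ [] := by
                    apply pvDead r3 prev _ (by simp)
                    intro w hw
                    fin_cases hw <;> simp [List.cons_prefix_cons, List.prefix_nil, he]
                  apply hdead
                  simpa [pvInnerA, pvWordsA, he] using h
                · intro h
                  exfalso
                  simp [pvSpeakB, List.isPrefixOf, Ne.symm he] at h
          · constructor
            · intro h
              exfalso
              have hdead : pvInnerA r2 prev ['a',d] ≠ [] := by
                apply pvDead r2 prev _ (by simp)
                intro w hw
                fin_cases hw <;> simp [List.cons_prefix_cons, hd]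
              apply hdead
              simpa [pvInnerA, pvWordsA, hd] using h
            · intro h
              exfalso
              simp [pvSpeakB, List.isPrefixOf, Ne.symm hd] at h
      · by_cases hcy : c = 'y'
        · subst hcy
          match rest with
          | [] =>
            simp [pvInnerA, pvSpeakB, pvWordsA, List.isPrefixOf]
          | d :: r2 =>
            by_cases hd : d = 'e'
            · subst hd
              by_cases hp : prev = ['y','e']
              · subst hp
                simp [pvInnerA, pvSpeakB, pvWordsA, List.isPrefixOf]
              · have hr : r2.length ≤ n := by simp at hl; omega
                simp only [pvInnerA, pvSpeakB, pvWordsA, List.isPrefixOf]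
                simp [hp, Ne.symm hp, ih r2 hr]
            · constructor
              · intro h
                exfalso
                have hdead : pvInnerA r2 prev ['y',d] ≠ [] := by
                  apply pvDead r2 prev _ (by simp)
                  intro w hw
                  fin_cases hw <;> simp [List.cons_prefix_cons, hd]
                apply hdead
                simpa [pvInnerA, pvWordsA, hd] using h
              · intro h
                exfalso
                simp [pvSpeakB, List.isPrefixOf, Ne.symm hd] at h
        · by_cases hcw : c = 'w'
          · subst hcw
            match rest with
            | [] =>
              simp [pvInnerA, pvSpeakB, pvWordsA, List.isPrefixOf]
            | d :: r2 =>
              by_cases hd : d = 'o'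
              · subst hd
                match r2 with
                | [] =>
                  simp [pvInnerA, pvSpeakB, pvWordsA, List.isPrefixOf]
                | e :: r3 =>
                  by_cases he : e = 'o'
                  · subst he
                    by_cases hp : prev = ['w','o','o']
                    · subst hp
                      simp [pvInnerA, pvSpeakB, pvWordsA, List.isPrefixOf]
                    · have hr : r3.length ≤ n := by simp at hl; omega
                      simp only [pvInnerA, pvSpeakB, pvWordsA, List.isPrefixOf]
                      simp [hp, Ne.symm hp, ih r3 hr]
                  · constructor
                    · intro h
                      exfalso
                      have hdead : pvInnerA r3 prev ['w','o',e] ≠ [] := by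
                        apply pvDead r3 prev _ (by simp)
                        intro w hw
                        fin_cases hw <;> simp [List.cons_prefix_cons, List.prefix_nil, he]
                      apply hdead
                      simpa [pvInnerA, pvWordsA, he] using h
                    · intro h
                      exfalso
                      simp [pvSpeakB, List.isPrefixOf, Ne.symm he] at h
              · constructor
                · intro h
                  exfalso
                  have hdead : pvInnerA r2 prev ['w',d] ≠ [] := by
                    apply pvDead r2 prev _ (by simp)
                    intro w hw
                    fin_cases hw <;> simp [List.cons_prefix_cons, hd]
                  apply hdead
                  simpa [pvInnerA, pvWordsA, hd] using h
                · intro h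
                  exfalso
                  simp [pvSpeakB, List.isPrefixOf, Ne.symm hd] at h
          · by_cases hcm : c = 'm'
            · subst hcm
              match rest with
              | [] =>
                simp [pvInnerA, pvSpeakB, pvWordsA, List.isPrefixOf]
              | d :: r2 =>
                by_cases hd : d = 'a'
                · subst hd
                  by_cases hp : prev = ['m','a']
                  · subst hp
                    simp [pvInnerA, pvSpeakB, pvWordsA, List.isPrefixOf]
                  · have hr : r2.length ≤ n := by simp at hl; omega
                    simp only [pvInnerA, pvSpeakB, pvWordsA, List.isPrefixOf]
                    simp [hp, Ne.symm hp, ih r2 hr]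
                · constructor
                  · intro h
                    exfalso
                    have hdead : pvInnerA r2 prev ['m',d] ≠ [] := by
                      apply pvDead r2 prev _ (by simp)
                      intro w hw
                      fin_cases hw <;> simp [List.cons_prefix_cons, hd]
                    apply hdead
                    simpa [pvInnerA, pvWordsA, hd] using h
                  · intro h
                    exfalso
                    simp [pvSpeakB, List.isPrefixOf, Ne.symm hd] at h
            · constructor
              · intro h
                exfalso
                have hdead : pvInnerA rest prev [c] ≠ [] := by
                  apply pvDead rest prev _ (by simp)
                  intro w hw
                  fin_cases hw <;> simp [List.cons_prefix_cons, hca, hcy, hcw, hcm]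
                apply hdead
                simpa [pvInnerA, pvWordsA] using h
              · intro h
                exfalso
                simp [pvSpeakB, List.isPrefixOf, Ne.symm hca, Ne.symm hcy, Ne.symm hcw, Ne.symm hcm] at h

-- the two per-string step functions of the folds agree
theorem pvStep (acc : Int) (word : String) :
    (if pvInnerA word.toList [] [] = [] then acc + 1 else acc) =
      acc + (if pvSpeakB word.toList [] then 1 else 0) := by
  by_cases h : pvSpeakB word.toList [] = true
  · simp [h, (pvMain word.toList.length word.toList le_rfl []).mpr h]
  · have : ¬ pvInnerA word.toList [] [] = [] := fun hc =>
      h ((pvMain word.toList.length word.toList le_rfl []).mp hc)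
    simp [h, this]

theorem pvFold : ∀ (xs : List String) (acc : Int),
    xs.foldl (fun answer word =>
      if pvInnerA word.toList [] [] = [] then answer + 1 else answer) acc =
    xs.foldl (fun a s => a + (if pvSpeakB s.toList [] then 1 else 0)) acc := by
  intro xs
  induction xs with
  | nil => intro acc; rfl
  | cons x xs ih =>
    intro acc
    rw [List.foldl_cons, List.foldl_cons, pvStep]
    exact ih _

-- ===== VERDICT (by name: the statement is the Claim_ definition above) =====
theorem solution_spec : Claim_equal_solution := by
  intro babbling _
  unfold Spec_solution solution solution_alt
  exact pvFold babbling 0
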